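-- pv_equiv track=rewrite | github.com/myamaak/Algorithms | [프로그래머스] 땅따먹기.py | solution
-- ===== SOURCE A (Python) =====
-- def solution(land):
--     answer = 0
--     N = len(land)
--     dp = [[None]*4 for i in range(N+1)]
--     dp[0] = [0,0,0,0]
--
--     for row in range(1,N+1):
--         for i in range(4):
--             dp[row][i] = max([dp[row-1][index] for index in range(4) if index !=i]) +land[row-1][i]
--
--     return max(dp[N])
-- ===== SOURCE B (Python) =====
-- def solution(land):
--     prev = [0, 0, 0, 0]
--     for row in land:
--         m1, j = prev[0], 0
--         m2 = None
--         for i in range(1, 4):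
--             if prev[i] > m1:
--                 m2 = m1
--                 m1, j = prev[i], i
--             else:
--                 m2 = prev[i] if m2 is None else max(m2, prev[i])
--         prev = [row[i] + (m2 if i == j else m1) for i in range(4)]
--     return max(prev)
-- ===== Notes on version B (the rewrite author's own statement) =====
-- stated objective: alternative
-- what changed: Replaces A's (N+1)-row dp table whose every cell rescans the previous row (max over the 3 other columns) by a single running previous-row array updated per row from one scan computing (max, its first index, second max); the dp table and all inner rescans disappear.
import Mathlib
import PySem

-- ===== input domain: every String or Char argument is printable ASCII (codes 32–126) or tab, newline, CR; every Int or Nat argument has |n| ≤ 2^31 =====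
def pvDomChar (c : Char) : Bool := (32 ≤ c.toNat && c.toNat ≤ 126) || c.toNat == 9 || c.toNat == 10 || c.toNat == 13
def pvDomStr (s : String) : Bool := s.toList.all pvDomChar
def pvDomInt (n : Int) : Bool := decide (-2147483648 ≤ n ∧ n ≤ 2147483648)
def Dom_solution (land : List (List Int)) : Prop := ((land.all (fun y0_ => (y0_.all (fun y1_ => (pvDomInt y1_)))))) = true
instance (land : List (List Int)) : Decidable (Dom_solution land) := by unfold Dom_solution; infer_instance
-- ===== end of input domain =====

-- B replaces A's full dp table, whose every cell rescans the previous row, by a single running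
-- previous row updated with one (max, argmax, second-max) scan per row: same return value.

-- ===== PORT A =====
-- one dp row of A: dp[row][i] = max([dp[row-1][index] for index in range(4) if index != i]) + land[row-1][i]
def rowA (dpPrev : List Int) (landRow : List Int) : List Int :=
  (PySem.List.pyRange 0 4 1).map (fun i =>
    (PySem.List.max? ((PySem.List.pyRange 0 4 1).filterMap (fun idx =>
        if idx ≠ i then some (PySem.List.pyGetD dpPrev idx 0) else none)) (fun y => y)).getD 0
    + PySem.List.pyGetD landRow i 0)

def solution (land : List (List Int)) : Int :=
  let N : Int := land.length
  let dp := (PySem.List.pyRange 1 (N + 1) 1).foldl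
    (fun dp row => dp ++ [rowA (PySem.List.pyGetD dp (row - 1) []) (PySem.List.pyGetD land (row - 1) [])])
    [[0, 0, 0, 0]]
  (PySem.List.max? (PySem.List.pyGetD dp N []) (fun y => y)).getD 0

-- ===== PORT B =====
-- one pass over prev: m1 = running max, j = its first index, m2 = max of the rest (Option.elim is
-- Source B's 'prev[i] if m2 is None else max(m2, prev[i])'); then build the new row from row and (m1, j, m2)
def stepB (prev : List Int) (row : List Int) : List Int :=
  let s := (PySem.List.pyRange 1 4 1).foldl
    (fun s i =>
      if PySem.List.pyGetD prev i 0 > s.1 then (PySem.List.pyGetD prev i 0, i, some s.1)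
      else (s.1, s.2.1, some ((s.2.2).elim (PySem.List.pyGetD prev i 0)
              (fun v => max v (PySem.List.pyGetD prev i 0)))))
    (PySem.List.pyGetD prev 0 0, (0 : Int), (none : Option Int))
  (PySem.List.pyRange 0 4 1).map (fun i =>
    PySem.List.pyGetD row i 0 + (if i == s.2.1 then (s.2.2).getD 0 else s.1))

def solution_alt (land : List (List Int)) : Int :=
  (PySem.List.max? (land.foldl stepB [0, 0, 0, 0]) (fun y => y)).getD 0

-- ===== PRECONDITION & SPEC =====
-- Pre_ excludes exactly the inputs where the Python A raises IndexError: a grid row with fewer than 4 columns.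
def Pre_solution (land : List (List Int)) : Prop := ∀ r ∈ land, 4 ≤ r.length
instance (land : List (List Int)) : Decidable (Pre_solution land) := by unfold Pre_solution; infer_instance
def pvWitness_solution : List (List Int) := [[1, 2, 3, 5], [5, 6, 7, 8], [4, 3, 2, 1]]
def Spec_solution (land : List (List Int)) (out : Int) : Prop := out = solution_alt land
instance (land : List (List Int)) (out : Int) : Decidable (Spec_solution land out) := by unfold Spec_solution; infer_instance

-- ===== CLAIM (what is proved, stated in full; the proofs are below) =====
def Claim_equal_solution : Prop := ∀ (land : List (List Int)), Dom_solution land → Pre_solution land → Spec_solution land (solution land)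

-- ===== LEMMAS AND PROOFS =====

theorem pyRange04 : PySem.List.pyRange 0 4 1 = [0, 1, 2, 3] := by decide
theorem pyRange14 : PySem.List.pyRange 1 4 1 = [1, 2, 3] := by decide

-- the per-row computations of A and B agree on any length-4 previous row
theorem rowA_eq_stepB (a b c d : Int) (row : List Int) :
    rowA [a, b, c, d] row = stepB [a, b, c, d] row := by
  have g0 : PySem.List.pyGetD [a, b, c, d] (0 : Int) 0 = a := by
    simp [PySem.List.pyGetD, PySem.List.pyGet?, PySem.List.pyIdx?]
  have g1 : PySem.List.pyGetD [a, b, c, d] (1 : Int) 0 = b := by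
    simp [PySem.List.pyGetD, PySem.List.pyGet?, PySem.List.pyIdx?]
  have g2 : PySem.List.pyGetD [a, b, c, d] (2 : Int) 0 = c := by
    simp [PySem.List.pyGetD, PySem.List.pyGet?, PySem.List.pyIdx?]
  have g3 : PySem.List.pyGetD [a, b, c, d] (3 : Int) 0 = d := by
    simp [PySem.List.pyGetD, PySem.List.pyGet?, PySem.List.pyIdx?]
  by_cases h1 : a < b
  · by_cases h2 : b < c
    · by_cases h3 : c < d
      · simp [rowA, stepB, pyRange04, pyRange14, g0, g1, g2, g3, h1, h2, h3,
          PySem.List.max?_id_cons, max_def]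
        split_ifs <;> omega
      · simp [rowA, stepB, pyRange04, pyRange14, g0, g1, g2, g3, h1, h2, h3,
          PySem.List.max?_id_cons, max_def]
        split_ifs <;> omega
    · by_cases h3 : b < d
      · simp [rowA, stepB, pyRange04, pyRange14, g0, g1, g2, g3, h1, h2, h3,
          PySem.List.max?_id_cons, max_def]
        split_ifs <;> omega
      · simp [rowA, stepB, pyRange04, pyRange14, g0, g1, g2, g3, h1, h2, h3,
          PySem.List.max?_id_cons, max_def]
        split_ifs <;> omega
  · by_cases h2 : a < c
    · by_cases h3 : c < d
      · simp [rowA, stepB, pyRange04, pyRange14, g0, g1, g2, g3, h1, h2, h3,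
          PySem.List.max?_id_cons, max_def]
        split_ifs <;> omega
      · simp [rowA, stepB, pyRange04, pyRange14, g0, g1, g2, g3, h1, h2, h3,
          PySem.List.max?_id_cons, max_def]
        split_ifs <;> omega
    · by_cases h3 : a < d
      · simp [rowA, stepB, pyRange04, pyRange14, g0, g1, g2, g3, h1, h2, h3,
          PySem.List.max?_id_cons, max_def]
        split_ifs <;> omega
      · simp [rowA, stepB, pyRange04, pyRange14, g0, g1, g2, g3, h1, h2, h3,
          PySem.List.max?_id_cons, max_def]
        split_ifs <;> omega

theorem length_stepB (prev row : List Int) : (stepB prev row).length = 4 := by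
  simp [stepB, pyRange04]

-- the dp fold of A, started after `done` rows with any dp of matching length whose last row has 4
-- entries, ends with last row = B's fold of the remaining rows from that last row
theorem invA (land : List (List Int)) : ∀ (rest done dp : List (List Int)),
    land = done ++ rest → dp.length = done.length + 1 → (dp.getLast?.getD []).length = 4 →
    ((PySem.List.pyRange ((done.length : Int) + 1) ((land.length : Int) + 1) 1).foldl
        (fun dp row => dp ++ [rowA (PySem.List.pyGetD dp (row - 1) []) (PySem.List.pyGetD land (row - 1) [])])
        dp).getLast?.getD []
      = rest.foldl stepB (dp.getLast?.getD []) := by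
  intro rest
  induction rest with
  | nil =>
    intro done dp hland hlen _
    subst hland
    rw [PySem.List.pyRange_one_eq_nil (by simp)]
    simp
  | cons r rest ih =>
    intro done dp hland hlen h4
    have hlt : (done.length : Int) + 1 < (land.length : Int) + 1 := by
      subst hland
      simp only [List.length_append, List.length_cons]
      push_cast
      omega
    rw [PySem.List.pyRange_one_cons hlt]
    simp only [List.foldl_cons]
    have e1 : (done.length : Int) + 1 - 1 = (done.length : Int) := by ring
    have hdp : PySem.List.pyGetD dp ((done.length : Int) + 1 - 1) [] = dp.getLast?.getD [] := by
      rw [e1, PySem.List.pyGetD_natCast, List.getLast?_eq_getElem?, hlen]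
      simp [List.getD]
    have hld : PySem.List.pyGetD land ((done.length : Int) + 1 - 1) [] = r := by
      rw [e1, PySem.List.pyGetD_natCast]
      subst hland
      simp [List.getD]
    rw [hdp, hld]
    have hstep : rowA (dp.getLast?.getD []) r = stepB (dp.getLast?.getD []) r := by
      match hm : dp.getLast?.getD [], h4 with
      | [a, b, c, d], _ => exact rowA_eq_stepB a b c d r
    rw [hstep]
    have := ih (done ++ [r]) (dp ++ [stepB (dp.getLast?.getD []) r])
      (by simpa using hland) (by simp [hlen]) (by simp [length_stepB])
    simpa [List.getLast?_concat] using this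

theorem length_foldA (land : List (List Int)) (l : List Int) :
    ∀ (init : List (List Int)),
      (l.foldl (fun dp row => dp ++ [rowA (PySem.List.pyGetD dp (row - 1) []) (PySem.List.pyGetD land (row - 1) [])]) init).length
        = init.length + l.length := by
  induction l with
  | nil => intro init; simp
  | cons x t ih => intro init; simp [ih]; omega

-- ===== VERDICT (by name: the statement is the Claim_ definition above) =====
theorem solution_spec : Claim_equal_solution := by
  unfold Claim_equal_solution
  intro land _ _
  unfold Spec_solution solution solution_alt
  dsimp only
  have hinv := invA land land [] [[0, 0, 0, 0]] (by simp) (by simp) (by simp)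
  simp only [List.length_nil, Nat.cast_zero, zero_add] at hinv
  have hlen := length_foldA land (PySem.List.pyRange 1 ((land.length : Int) + 1) 1) [[0, 0, 0, 0]]
  rw [PySem.List.length_pyRange_one] at hlen
  -- the final dp read dp[N] is its last element
  have hget : PySem.List.pyGetD
      ((PySem.List.pyRange 1 ((land.length : Int) + 1) 1).foldl
        (fun dp row => dp ++ [rowA (PySem.List.pyGetD dp (row - 1) []) (PySem.List.pyGetD land (row - 1) [])])
        [[0, 0, 0, 0]]) ((land.length : Int)) []
      = ((PySem.List.pyRange 1 ((land.length : Int) + 1) 1).foldl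
        (fun dp row => dp ++ [rowA (PySem.List.pyGetD dp (row - 1) []) (PySem.List.pyGetD land (row - 1) [])])
        [[0, 0, 0, 0]]).getLast?.getD [] := by
    rw [PySem.List.pyGetD_natCast, List.getLast?_eq_getElem?]
    simp [List.getD, hlen]
  rw [hget, hinv]
  norm_num
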